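-- pv_equiv track=rewrite | github.com/hahoyeah/codingtest | 프로그래머스/unrated/135808. 과일 장수/과일 장수.py | solution
-- ===== SOURCE A (Python) =====
-- def solution(k, m, score):
--     answer = 0
--     score = sorted(score, reverse = True)
--     if len(score) < m:
--         return answer
--     for i in range(1,len(score)//m+1):
--         answer += min(score[m*(i-1):m*i]) * m
--     return answer
-- ===== SOURCE B (Python) =====
-- def solution(k, m, score):
--     if len(score) // m <= 0:
--         return 0
--     total = 0
--     countdown = len(score) % m + 1
--     for x in sorted(score):
--         countdown -= 1
--         if countdown == 0:
--             total += x
--             countdown = m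
--     return total * m
-- ===== Notes on version B (the rewrite author's own statement) =====
-- stated objective: alternative
-- what changed: B replaces A's descending sort plus per-box slicing and min() scans by a single linear pass over the ascending sorted list with a countdown accumulator that adds every m-th element starting at offset len(score)%m, guarded by a full-box count check.
import Mathlib
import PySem

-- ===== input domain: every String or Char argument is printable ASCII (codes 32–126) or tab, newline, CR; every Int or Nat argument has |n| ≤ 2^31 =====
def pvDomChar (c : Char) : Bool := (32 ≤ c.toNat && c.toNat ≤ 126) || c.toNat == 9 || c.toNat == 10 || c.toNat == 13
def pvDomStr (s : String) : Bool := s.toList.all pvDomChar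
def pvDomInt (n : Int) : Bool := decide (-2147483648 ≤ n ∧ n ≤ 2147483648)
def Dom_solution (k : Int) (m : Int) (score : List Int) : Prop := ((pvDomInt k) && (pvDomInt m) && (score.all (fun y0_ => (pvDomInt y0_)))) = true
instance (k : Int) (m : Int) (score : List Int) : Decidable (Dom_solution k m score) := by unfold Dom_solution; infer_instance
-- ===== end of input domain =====

-- B replaces A's descending sort + per-box slice/min() by one linear pass over the ascending
-- sorted list with a countdown accumulator (objective: alternative); equal on Pre_ (m ≠ 0).


-- ===== PORT A =====
-- answer = 0; score = sorted(score, reverse=True); if len(score) < m: return answer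
-- for i in range(1, len(score)//m + 1): answer += min(score[m*(i-1):m*i]) * m
-- (min() of the slice: PySem.List.min?; under Pre_ (m ≠ 0) the slice is never empty inside
--  the loop, so the .getD 0 default is never taken.)
def solution (k : Int) (m : Int) (score : List Int) : Int :=
  let answer : Int := 0
  let score := PySem.List.sorted score (fun x => x) true
  if (score.length : Int) < m then answer
  else
    (PySem.List.pyRange 1 (PySem.Int.floordiv (score.length : Int) m + 1) 1).foldl
      (fun answer i =>
        answer +
          (PySem.List.min? (PySem.List.slice score (some (m * (i - 1))) (some (m * i)))
              (fun x => x)).getD 0 * m)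
      answer

-- ===== PORT B =====
-- if len(score) // m <= 0: return 0
-- total = 0; countdown = len(score) % m + 1
-- for x in sorted(score): countdown -= 1; if countdown == 0: total += x; countdown = m
-- return total * m
def solution_alt (k : Int) (m : Int) (score : List Int) : Int :=
  if PySem.Int.floordiv (score.length : Int) m ≤ 0 then 0
  else
    let st := (PySem.List.sorted score (fun x => x) false).foldl
      (fun (st : Int × Int) x =>
        let countdown := st.2 - 1
        if countdown = 0 then (st.1 + x, m) else (st.1, countdown))
      (0, PySem.Int.mod (score.length : Int) m + 1)
    st.1 * m

-- ===== PRECONDITION & SPEC =====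
-- Pre_ excludes exactly m = 0, where A (and B) raise ZeroDivisionError on len(score) // m.
def Pre_solution (k : Int) (m : Int) (score : List Int) : Prop := m ≠ 0
instance (k : Int) (m : Int) (score : List Int) : Decidable (Pre_solution k m score) := by unfold Pre_solution; infer_instance
def pvWitness_solution : Int × Int × List Int := (4, 3, [1, 2, 3, 1])

def Spec_solution (k : Int) (m : Int) (score : List Int) (out : Int) : Prop := out = solution_alt k m score
instance (k : Int) (m : Int) (score : List Int) (out : Int) : Decidable (Spec_solution k m score out) := by unfold Spec_solution; infer_instance

-- ===== CLAIM (what is proved, stated in full; the proofs are below) =====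
def Claim_equal_solution : Prop := ∀ (k : Int) (m : Int) (score : List Int), Dom_solution k m score → Pre_solution k m score → Spec_solution k m score (solution k m score)

-- ===== LEMMAS AND PROOFS =====

-- sorted(xs, reverse=True) is the reverse of sorted(xs) (identity key on Int).
theorem pv_sorted_rev_eq_reverse (xs : List Int) :
    PySem.List.sorted xs (fun x => x) true = (PySem.List.sorted xs (fun x => x) false).reverse := by
  have h : (PySem.List.sorted xs (fun x => x) true).reverse
      = PySem.List.sorted xs (fun x => x) false := by
    apply PySem.List.eq_of_perm_of_pairwise_le_of_injective (fun x => x) (fun a b h => h)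
    · exact ((PySem.List.sorted xs (fun x => x) true).reverse_perm.trans
        (PySem.List.sorted_perm xs (fun x => x) true)).trans
        (PySem.List.sorted_perm xs (fun x => x) false).symm
    · exact (List.pairwise_reverse).mpr (PySem.List.sorted_pairwise_rev xs (fun x => x))
    · exact PySem.List.sorted_pairwise xs (fun x => x)
  calc PySem.List.sorted xs (fun x => x) true
      = (PySem.List.sorted xs (fun x => x) true).reverse.reverse := (List.reverse_reverse _).symm
    _ = (PySem.List.sorted xs (fun x => x) false).reverse := by rw [h]

-- min() of a nonempty weakly-decreasing list is its last element.
theorem pv_min_of_anti (xs : List Int) (h : xs ≠ []) (hp : xs.Pairwise (fun a b => b ≤ a)) :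
    (PySem.List.min? xs (fun x => x)).getD 0 = xs.getLast h := by
  cases hmin : PySem.List.min? xs (fun x => x) with
  | none => exact absurd ((PySem.List.min?_eq_none_iff xs _).mp hmin) h
  | some v =>
    have hv_le : v ≤ xs.getLast h := PySem.List.min?_isMin hmin _ (List.getLast_mem h)
    have hmem := PySem.List.min?_mem hmin
    obtain ⟨iv, hiv, hvi⟩ := List.mem_iff_getElem.mp hmem
    have hlast : xs.getLast h = xs[xs.length - 1] := List.getLast_eq_getElem h
    have hle_v : xs.getLast h ≤ v := by
      rcases Nat.lt_or_ge iv (xs.length - 1) with hlt | hge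
      · rw [hlast, ← hvi]
        exact (List.pairwise_iff_getElem.mp hp) iv (xs.length - 1) hiv (by omega) hlt
      · have heq : xs.length - 1 = iv := by omega
        rw [hlast, ← hvi]
        simp only [heq, le_refl]
    simp [le_antisymm hv_le hle_v]

-- min() of the block [a,b) of the reversed ascending list is the ascending element at n - b.
theorem pv_block_min (s : List Int) (hs : s.Pairwise (fun a b : Int => a ≤ b))
    (a b : Nat) (hab : a < b) (hb : b ≤ s.length) :
    (PySem.List.min? ((s.reverse.drop a).take (b - a)) (fun x => x)).getD 0
      = s.getD (s.length - b) 0 := by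
  have hlen_take : (s.take (s.length - a)).length = s.length - a := by
    simp
  have hidx : s.length - a - (b - a) = s.length - b := by omega
  have hblock : (s.reverse.drop a).take (b - a)
      = ((s.take (s.length - a)).drop (s.length - b)).reverse := by
    rw [List.drop_reverse, List.take_reverse, hlen_take, hidx]
  have hlen_t : ((s.take (s.length - a)).drop (s.length - b)).length = b - a := by
    rw [List.length_drop, hlen_take]; omega
  have ht_ne : (s.take (s.length - a)).drop (s.length - b) ≠ [] := by
    intro hnil; rw [hnil] at hlen_t; simp at hlen_t; omega
  have hrev_ne : ((s.take (s.length - a)).drop (s.length - b)).reverse ≠ [] := by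
    simpa using ht_ne
  have hsub : List.Sublist ((s.take (s.length - a)).drop (s.length - b)) s :=
    (List.drop_sublist _ _).trans (List.take_sublist _ _)
  have hp : ((s.take (s.length - a)).drop (s.length - b)).reverse.Pairwise
      (fun x y : Int => y ≤ x) := (List.pairwise_reverse).mpr (hs.sublist hsub)
  rw [hblock, pv_min_of_anti _ hrev_ne hp, List.getLast_reverse]
  have hd : s.length - b < (s.take (s.length - a)).length := by omega
  rw [List.head_drop, List.getElem_take, List.getD_eq_getElem s 0 (by omega)]

-- the per-iteration term of A equals the ascending element at n - i*m.
theorem pv_term_eq (s : List Int) (hs : s.Pairwise (fun a b : Int => a ≤ b))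
    (m i : Int) (hm : 0 < m) (hi : 1 ≤ i) (hig : i * m ≤ (s.length : Int)) :
    (PySem.List.min? (PySem.List.slice s.reverse (some (m * (i - 1))) (some (m * i)))
        (fun x => x)).getD 0
      = PySem.List.pyGetD s ((s.length : Int) - i * m) 0 := by
  have hm' : m = (m.toNat : Int) := (Int.toNat_of_nonneg hm.le).symm
  have hi' : i = (i.toNat : Int) := (Int.toNat_of_nonneg (by omega)).symm
  have hM : 1 ≤ m.toNat := by omega
  have hJ : 1 ≤ i.toNat := by omega
  have hjm : i.toNat * m.toNat ≤ s.length := by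
    have : ((i.toNat * m.toNat : Nat) : Int) ≤ (s.length : Int) := by
      push_cast; rw [← hm', ← hi']; exact hig
    exact_mod_cast this
  have e1 : m * (i - 1) = ((m.toNat * (i.toNat - 1) : Nat) : Int) := by
    rw [Nat.cast_mul, Nat.cast_sub hJ, ← hm', ← hi']; ring
  have e2 : m * i = ((m.toNat * i.toNat : Nat) : Int) := by
    rw [Nat.cast_mul, ← hm', ← hi']
  have e3 : (s.length : Int) - i * m = ((s.length - i.toNat * m.toNat : Nat) : Int) := by
    rw [Nat.cast_sub hjm, Nat.cast_mul, ← hm', ← hi']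
  rw [e1, e2, e3, PySem.List.slice_natCast, PySem.List.pyGetD_natCast]
  have hab : m.toNat * (i.toNat - 1) < m.toNat * i.toNat := by
    have hstep : m.toNat * (i.toNat - 1) + m.toNat = m.toNat * i.toNat := by
      have hj1 : (i.toNat - 1) + 1 = i.toNat := by omega
      calc m.toNat * (i.toNat - 1) + m.toNat = m.toNat * ((i.toNat - 1) + 1) := by ring
        _ = m.toNat * i.toNat := by rw [hj1]
    omega
  have hb : m.toNat * i.toNat ≤ s.length := by rw [Nat.mul_comm]; exact hjm
  have := pv_block_min s hs (m.toNat * (i.toNat - 1)) (m.toNat * i.toNat) hab hb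
  rw [this]
  congr 1
  rw [Nat.mul_comm]

-- the sum accumulated by B's countdown loop, as a recursion over the list.
def pvPickSum (m : Int) : Int → List Int → Int
  | _, [] => 0
  | c, x :: xs => if c - 1 = 0 then x + pvPickSum m m xs else pvPickSum m (c - 1) xs

-- B's fold computes pvPickSum.
theorem pv_fold_eq_pickSum (m : Int) (t : List Int) :
    ∀ (acc c : Int),
      (t.foldl (fun (st : Int × Int) x =>
          if st.2 - 1 = 0 then (st.1 + x, m) else (st.1, st.2 - 1)) (acc, c)).1
        = acc + pvPickSum m c t := by
  induction t with
  | nil => intro acc c; simp [pvPickSum]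
  | cons x xs ih =>
    intro acc c
    simp only [List.foldl_cons, pvPickSum]
    by_cases h : c - 1 = 0
    · simp [h, ih]; ring
    · simp [h, ih]

-- shifting the start: pvPickSum at countdown c is pvPickSum at 1 after dropping c-1 items.
theorem pv_pick_drop (m : Int) (t : List Int) :
    ∀ c : Int, 1 ≤ c → pvPickSum m c t = pvPickSum m 1 (t.drop (c.toNat - 1)) := by
  induction t with
  | nil => intro c _; simp [pvPickSum]
  | cons x xs ih =>
    intro c hc
    by_cases h : c = 1
    · simp [h]
    · have h1 : ¬ (c - 1 = 0) := by omega
      have h2 : c.toNat - 1 = (c.toNat - 2) + 1 := by omega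
      have h3 : (c - 1).toNat - 1 = c.toNat - 2 := by omega
      simp only [pvPickSum, if_neg h1, h2, List.drop_succ_cons]
      rw [ih (c - 1) (by omega), h3]

-- chunking: on a list of length G*M (M = m.toNat ≥ 1), the countdown-1 pick sum is the
-- sum of the heads of the successive M-chunks.
theorem pv_pick_chunks (m : Int) (hm : 0 < m) :
    ∀ (G : Nat) (t : List Int), t.length = G * m.toNat →
      pvPickSum m 1 t = ((List.range G).map (fun j => t.getD (j * m.toNat) 0)).sum := by
  intro G
  induction G with
  | zero =>
    intro t ht
    have : t = [] := List.eq_nil_of_length_eq_zero (by omega)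
    simp [this, pvPickSum]
  | succ G ih =>
    intro t ht
    have hM : 1 ≤ m.toNat := by omega
    have hne : t ≠ [] := by intro h; rw [h] at ht; simp at ht; omega
    obtain ⟨x, xs, rfl⟩ := List.exists_cons_of_ne_nil hne
    have hExp : (G + 1) * m.toNat = G * m.toNat + m.toNat := by ring
    have hlen : xs.length = G * m.toNat + (m.toNat - 1) := by
      simp at ht; omega
    have hdroplen : (xs.drop (m.toNat - 1)).length = G * m.toNat := by
      simp [hlen]
    have step : pvPickSum m 1 (x :: xs) = x + pvPickSum m 1 (xs.drop (m.toNat - 1)) := by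
      simp only [pvPickSum]
      rw [show (1 : Int) - 1 = 0 from by norm_num, if_pos rfl,
        pv_pick_drop m xs m (by omega)]
    rw [step, ih (xs.drop (m.toNat - 1)) hdroplen]
    rw [List.range_succ_eq_map]
    simp only [List.map_cons, List.map_map, List.sum_cons]
    congr 1
    · simp
    · apply congrArg
      apply List.map_congr_left
      intro j hj
      simp only [Function.comp]
      have hidx : (j + 1) * m.toNat = (m.toNat - 1) + 1 + j * m.toNat := by
        rw [Nat.sub_add_cancel hM]; ring
      rw [hidx]
      rw [List.getD_eq_getElem?_getD, List.getD_eq_getElem?_getD, List.getElem?_drop]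
      rw [show m.toNat - 1 + 1 + j * m.toNat = (m.toNat - 1 + j * m.toNat) + 1 from by omega,
        List.getElem?_cons_succ]

-- pyRange 1 (G+1) as a mapped Nat range.
theorem pv_pyRange_one_eq_map (G : Nat) :
    PySem.List.pyRange 1 ((G : Int) + 1) 1
      = List.map (fun j : Nat => ((j : Int) + 1)) (List.range G) := by
  suffices h : ∀ (G : Nat) (a : Int), PySem.List.pyRange a (a + (G : Int)) 1
      = List.map (fun j : Nat => a + (j : Int)) (List.range G) by
    have := h G 1
    simpa [add_comm] using this
  intro G
  induction G with
  | zero =>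
    intro a
    rw [PySem.List.pyRange_one_eq_nil (by norm_num), List.range_zero, List.map_nil]
  | succ G ih =>
    intro a
    have hcons : PySem.List.pyRange a (a + ((G : Int) + 1)) 1
        = a :: PySem.List.pyRange (a + 1) (a + ((G : Int) + 1)) 1 :=
      PySem.List.pyRange_one_cons (by omega)
    have harg : a + ((G : Int) + 1) = (a + 1) + (G : Int) := by ring
    rw [show ((G + 1 : Nat) : Int) = (G : Int) + 1 by push_cast; ring, hcons, harg, ih (a + 1),
      List.range_succ_eq_map, List.map_cons, List.map_map]
    refine congrArg₂ List.cons (by simp) ?_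
    apply List.map_congr_left
    intro j _
    simp only [Function.comp_apply]
    push_cast
    ring

-- reflecting a Nat-range sum.
theorem pv_sum_range_reflect (f : Nat → Int) :
    ∀ G : Nat, ((List.range G).map (fun j => f (G - 1 - j))).sum = ((List.range G).map f).sum := by
  intro G
  induction G with
  | zero => simp
  | succ G ih =>
    rw [List.range_succ_eq_map]
    simp only [List.map_cons, List.map_map, List.sum_cons]
    have h1 : (fun j => f (G + 1 - 1 - j)) ∘ Nat.succ = fun j => f (G - 1 - j) := by
      funext j
      simp only [Function.comp_apply]
      congr 1
      omega
    have h2 : G + 1 - 1 - 0 = G := by omega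
    rw [h1, h2, ih]
    have hR : (List.map (f ∘ Nat.succ) (List.range G)).sum
        = (List.map f ((List.range G).map Nat.succ)).sum := by rw [List.map_map]
    rw [hR, show f 0 + (List.map f ((List.range G).map Nat.succ)).sum
        = (List.map f (0 :: (List.range G).map Nat.succ)).sum from by simp,
      ← List.range_succ_eq_map, List.range_succ]
    simp [add_comm]

-- ===== VERDICT (by name: the statement is the Claim_ definition above) =====
theorem solution_spec : Claim_equal_solution := by
  intro k m score _ hm
  show solution k m score = solution_alt k m score
  unfold solution solution_alt
  simp only [pv_sorted_rev_eq_reverse, List.length_reverse]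
  rw [show score.length = (PySem.List.sorted score (fun x => x) false).length from
    (PySem.List.sorted_perm score (fun x => x) false).length_eq.symm]
  set s := PySem.List.sorted score (fun x => x) false with hsdef
  set n : Int := (s.length : Int) with hn
  set g : Int := PySem.Int.floordiv n m with hg
  have hn0 : 0 ≤ n := by positivity
  have hs : s.Pairwise (fun a b : Int => a ≤ b) := PySem.List.sorted_pairwise score (fun x => x)
  rcases lt_trichotomy m 0 with hneg | hzero | hpos
  · -- m < 0: A's guard is false but its range is empty; B's guard g ≤ 0 holds
    have hge : g ≤ 0 := by
      by_contra hgt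
      have hdm := PySem.Int.floordiv_mul_add_mod n m
      have hmod := PySem.Int.mod_neg_bounds (a := n) hneg
      rw [← hg] at hdm
      nlinarith
    rw [if_neg (by omega), if_pos hge, PySem.List.pyRange_one_eq_nil (by omega)]
    simp
  · exact absurd hzero hm
  · by_cases hlt : n < m
    · -- 0 < m, n < m: A returns early with 0; B's guard g ≤ 0 holds
      have hg0 : g = 0 := (PySem.Int.floordiv_eq_iff_of_pos hpos).mpr ⟨by omega, by omega⟩
      rw [if_pos hlt, if_pos (by omega)]
    · -- 0 < m ≤ n: A's block-min sum equals B's countdown pick sum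
      have hg1 : 1 ≤ g := (PySem.Int.le_floordiv_iff_mul_le hpos).mpr (by omega)
      rw [if_neg hlt, if_neg (by omega), PySem.List.foldl_add, zero_add]
      set r : Int := PySem.Int.mod n m with hr
      have hdm := PySem.Int.floordiv_mul_add_mod n m
      rw [← hg, ← hr] at hdm
      have hr0 : 0 ≤ r := PySem.Int.mod_nonneg (a := n) hpos
      have hrm : r < m := PySem.Int.mod_lt (a := n) hpos
      -- A's side as a mapped Nat-range sum with the factor m pulled out
      have hmap : ∀ i ∈ PySem.List.pyRange 1 (g + 1) 1,
          (PySem.List.min? (PySem.List.slice s.reverse (some (m * (i - 1))) (some (m * i)))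
              (fun x => x)).getD 0 * m
            = PySem.List.pyGetD s (n - i * m) 0 * m := by
        intro i hi
        obtain ⟨h1, h2⟩ := PySem.List.mem_pyRange_one.mp hi
        have him : i * m ≤ n := by nlinarith
        rw [pv_term_eq s hs m i hpos h1 him]
      rw [List.map_congr_left hmap]
      have hG : g = (g.toNat : Int) := (Int.toNat_of_nonneg (by omega)).symm
      have hM : m = (m.toNat : Int) := (Int.toNat_of_nonneg hpos.le).symm
      have hR : r = (r.toNat : Int) := (Int.toNat_of_nonneg hr0).symm
      rw [hG, pv_pyRange_one_eq_map g.toNat, List.map_map]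
      simp only [Function.comp_def]
      rw [List.sum_map_mul_right]
      -- B's side via pvPickSum, then chunking
      rw [pv_fold_eq_pickSum m s 0 (r + 1), zero_add,
        pv_pick_drop m s (r + 1) (by omega)]
      have hr1 : (r + 1).toNat - 1 = r.toNat := by omega
      rw [hr1]
      have hdroplen : (s.drop r.toNat).length = g.toNat * m.toNat := by
        have h1 : (s.length : Int) = (g.toNat : Int) * (m.toNat : Int) + (r.toNat : Int) := by
          rw [← hM, ← hG, ← hR]; omega
        have h2 : s.length = g.toNat * m.toNat + r.toNat := by exact_mod_cast h1
        simp [h2]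
      rw [pv_pick_chunks m hpos g.toNat (s.drop r.toNat) hdroplen]
      refine congrArg (fun z => z * m) ?_
      rw [← pv_sum_range_reflect (fun j => (s.drop r.toNat).getD (j * m.toNat) 0) g.toNat]
      apply congrArg
      apply List.map_congr_left
      intro j hj
      have hjG : j < g.toNat := List.mem_range.mp hj
      have hidx : n - ((j : Int) + 1) * m
          = ((r.toNat + (g.toNat - 1 - j) * m.toNat : Nat) : Int) := by
        have hc : ((g.toNat - 1 - j : Nat) : Int) = g - 1 - (j : Int) := by omega
        push_cast
        rw [hc, ← hR, ← hM]
        have hn_eq : n = g * m + r := by omega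
        rw [hn_eq]
        ring
      rw [hidx, PySem.List.pyGetD_natCast]
      rw [List.getD_eq_getElem?_getD, List.getD_eq_getElem?_getD, List.getElem?_drop]
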